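-- pv_equiv track=rewrite | github.com/pastuszko28/Venom | venom_core/api/routes/academy_conversion.py | records_from_text
-- ===== SOURCE A (Python) =====
-- from typing import Any, Callable, Dict, List, TextIO
--
-- def records_from_text(content: str) -> List[Dict[str, str]]:
--     """Build training records from plain text chunks."""
--     sections = [item.strip() for item in content.split("\n\n") if item.strip()]
--     records: List[Dict[str, str]] = []
--     for i in range(0, len(sections), 2):
--         instruction = sections[i]
--         output = sections[i + 1] if i + 1 < len(sections) else ""
--         if not instruction:
--             continue
--         if not output:
--             output = instruction
--         records.append(
--             {
--                 "instruction": instruction[:2000],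
--                 "input": "",
--                 "output": output[:8000],
--             }
--         )
--     if not records and content.strip():
--         records.append(
--             {
--                 "instruction": "Summarize and structure the document content.",
--                 "input": "",
--                 "output": content.strip()[:12000],
--             }
--         )
--     return records
-- ===== SOURCE B (Python) =====
-- from typing import Dict, List
--
--
-- def records_from_text(content: str) -> List[Dict[str, str]]:
--     """Build training records in one fused pass: a state machine with a pending
--     instruction, stripping/filtering/pairing the chunks as they stream by."""
--     records: List[Dict[str, str]] = []
--     pending = None
--     for raw in content.split("\n\n"):
--         section = raw.strip()
--         if not section:
--             continue
--         if pending is None: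
--             pending = section
--         else:
--             records.append(
--                 {"instruction": pending[:2000], "input": "", "output": section[:8000]}
--             )
--             pending = None
--     if pending is not None:
--         records.append(
--             {"instruction": pending[:2000], "input": "", "output": pending[:8000]}
--         )
--     if not records:
--         stripped = content.strip()
--         if stripped:
--             records.append(
--                 {
--                     "instruction": "Summarize and structure the document content.",
--                     "input": "",
--                     "output": stripped[:12000],
--                 }
--             )
--     return records
-- ===== Notes on version B (the rewrite author's own statement) =====
-- stated objective: alternative
-- what changed: Replaces A's staged pipeline (build a stripped+filtered sections list, then pair it by index-stepping over range(0,len,2) with bounds checks) by a single fused pass over the raw split chunks driven by a pending-instruction state machine: each chunk is stripped, skipped if empty, and either stored as pending or flushed as a record, with a final flush for an odd trailing section; no sections list or index arithmetic exists.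
import Mathlib
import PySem

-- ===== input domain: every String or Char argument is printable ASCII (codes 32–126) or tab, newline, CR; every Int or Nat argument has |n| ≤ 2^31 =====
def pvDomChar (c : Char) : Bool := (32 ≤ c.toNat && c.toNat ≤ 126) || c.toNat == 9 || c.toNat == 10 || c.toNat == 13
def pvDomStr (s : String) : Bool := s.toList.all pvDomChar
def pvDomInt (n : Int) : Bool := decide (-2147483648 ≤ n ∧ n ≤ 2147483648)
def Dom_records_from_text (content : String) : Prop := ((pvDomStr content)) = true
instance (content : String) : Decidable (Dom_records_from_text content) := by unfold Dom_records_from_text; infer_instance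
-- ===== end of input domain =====

-- B replaces A's staged pipeline (sections list, then index-stepped pairing over
-- range(0,len,2)) by one fused pass over the raw split chunks with a pending-instruction
-- state machine (objective: alternative decomposition; not faster).

-- ===== PORT A =====
-- the record dict literal (insertion order), as written in both Pythons
def pvRec (instruction output : String) : List (String × String) :=
  [("instruction", PySem.Str.slice instruction none (some 2000)),
   ("input", ""),
   ("output", PySem.Str.slice output none (some 8000))]

-- A's loop body, named so the proofs can speak about it
def pvBodyA (sections : List String) (recs : List (List (String × String))) (i : Int) :
    List (List (String × String)) :=
  let instruction := PySem.List.pyGetD sections i ""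
  let output := if i + 1 < PySem.List.len sections then PySem.List.pyGetD sections (i + 1) "" else ""
  if instruction = "" then recs
  else
    let output := if output = "" then instruction else output
    recs ++ [pvRec instruction output]

def records_from_text (content : String) : List (List (String × String)) :=
  let sections := (((PySem.Str.split? content "\n\n").getD []).map PySem.Str.strip).filter
    (fun s => !(s == ""))
  let records := (PySem.List.pyRange 0 (PySem.List.len sections) 2).foldl (pvBodyA sections) []
  if records = [] ∧ ¬ (PySem.Str.strip content = "") then
    records ++ [[("instruction", "Summarize and structure the document content."),
                 ("input", ""),
                 ("output", PySem.Str.slice (PySem.Str.strip content) none (some 12000))]]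
  else records

-- ===== PORT B =====
-- the loop body: strip the raw chunk, skip it if empty, else toggle the pending state
def pvStepB (st : List (List (String × String)) × Option String) (raw : String) :
    List (List (String × String)) × Option String :=
  let s := PySem.Str.strip raw
  if s = "" then st
  else
    match st.2 with
    | none => (st.1, some s)
    | some pending => (st.1 ++ [pvRec pending s], none)

-- 'if pending is not None: records.append(...)' after the loop
def pvFinish (st : List (List (String × String)) × Option String) :
    List (List (String × String)) :=
  match st.2 with
  | none => st.1
  | some pending => st.1 ++ [pvRec pending pending]

def records_from_text_alt (content : String) : List (List (String × String)) :=
  let st := ((PySem.Str.split? content "\n\n").getD []).foldl pvStepB ([], none)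
  let records := pvFinish st
  if records = [] then
    let stripped := PySem.Str.strip content
    if ¬ (stripped = "") then
      [[("instruction", "Summarize and structure the document content."),
        ("input", ""),
        ("output", PySem.Str.slice stripped none (some 12000))]]
    else []
  else records

-- ===== PRECONDITION & SPEC =====
def Spec_records_from_text (content : String) (out : List (List (String × String))) : Prop := out = records_from_text_alt content
instance (content : String) (out : List (List (String × String))) : Decidable (Spec_records_from_text content out) := by unfold Spec_records_from_text; infer_instance

-- ===== CLAIM (what is proved, stated in full; the proofs are below) =====
def Claim_equal_records_from_text : Prop := ∀ (content : String), Dom_records_from_text content → Spec_records_from_text content (records_from_text content)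

-- ===== LEMMAS AND PROOFS =====

-- proof-level characterisation: the records produced from a (stripped, nonempty)
-- section list, consumed two at a time
def pvPairs : List String → List (List (String × String))
  | [] => []
  | [instruction] => [pvRec instruction instruction]
  | instruction :: output :: rest => pvRec instruction output :: pvPairs rest

theorem pvRange2_zero : PySem.List.pyRange 0 0 2 = [] := by decide

theorem pvRange2_one : PySem.List.pyRange 0 1 2 = [0] := by decide

theorem pvRange2_shift (n : Nat) :
    PySem.List.pyRange 0 ((n : Int) + 2) 2 = 0 :: (PySem.List.pyRange 0 (n : Int) 2).map (· + 2) := by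
  rw [PySem.List.pyRange_of_pos _ _ (by norm_num), PySem.List.pyRange_of_pos _ _ (by norm_num)]
  rw [if_pos (by omega : (0:Int) < (n:Int) + 2)]
  have hc : (((n:Int) + 2 - 0 + 2 - 1) / 2).toNat
      = (if (0:Int) < (n:Int) then (((n:Int) - 0 + 2 - 1) / 2).toNat else 0) + 1 := by
    split_ifs <;> omega
  rw [hc, List.range_succ_eq_map, List.map_cons, List.map_map, List.map_map]
  congr 1

theorem pvGetD_cons2 (a b : String) (t : List String) (i : Int) (hi : 0 ≤ i) :
    PySem.List.pyGetD (a :: b :: t) (i + 2) "" = PySem.List.pyGetD t i "" := by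
  rw [PySem.List.pyGetD_of_nonneg _ _ (by omega), PySem.List.pyGetD_of_nonneg _ _ hi]
  have : (i + 2).toNat = i.toNat + 2 := by omega
  rw [this]
  rfl

theorem pvFold_pairs : ∀ (xs : List String), (∀ x ∈ xs, x ≠ "") →
    ∀ (acc : List (List (String × String))),
    (PySem.List.pyRange 0 (PySem.List.len xs) 2).foldl (pvBodyA xs) acc = acc ++ pvPairs xs
  | [], _, acc => by
    have h0 : PySem.List.len ([] : List String) = 0 := by simp [PySem.List.len]
    rw [h0, pvRange2_zero]
    simp [pvPairs]
  | [a], h, acc => by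
    have ha : a ≠ "" := h a (by simp)
    have h1 : PySem.List.len [a] = 1 := by simp [PySem.List.len]
    rw [h1, pvRange2_one]
    have g0 : PySem.List.pyGetD [a] 0 "" = a := by
      rw [PySem.List.pyGetD_of_nonneg _ _ le_rfl]; rfl
    simp only [List.foldl, pvPairs, pvBodyA, g0, h1]
    rw [if_neg (by norm_num : ¬ ((0:Int) + 1 < 1)), if_neg ha, if_pos rfl]
  | a :: b :: t, h, acc => by
    have ha : a ≠ "" := h a (by simp)
    have hb : b ≠ "" := h b (by simp)
    have hlen : PySem.List.len (a :: b :: t) = (t.length : Int) + 2 := by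
      simp [PySem.List.len]; omega
    rw [hlen, pvRange2_shift]
    rw [List.foldl_cons, List.foldl_map]
    have hstep : ∀ (acc' : List (List (String × String))), ∀ i ∈ PySem.List.pyRange 0 (t.length : Int) 2,
        pvBodyA (a :: b :: t) acc' (i + 2) = pvBodyA t acc' i := by
      intro acc' i hi
      have h0i : 0 ≤ i := by
        have := (PySem.List.mem_pyRange_iff_of_pos (by norm_num) i).mp hi
        omega
      unfold pvBodyA
      rw [pvGetD_cons2 _ _ _ _ h0i]
      rw [show i + 2 + 1 = i + 1 + 2 from by ring]
      rw [pvGetD_cons2 _ _ _ _ (by omega : (0:Int) ≤ i + 1), hlen]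
      by_cases hc : i + 1 < (t.length : Int)
      · rw [if_pos (by omega : i + 1 + 2 < (t.length : Int) + 2),
            if_pos (show i + 1 < PySem.List.len t by simp [PySem.List.len]; omega)]
      · rw [if_neg (by omega : ¬ (i + 1 + 2 < (t.length : Int) + 2)),
            if_neg (show ¬ (i + 1 < PySem.List.len t) by simp [PySem.List.len]; omega)]
    rw [PySem.List.foldl_congr_mem _ _ _ _ (fun acc' => hstep acc')]
    have g0 : PySem.List.pyGetD (a :: b :: t) 0 "" = a := by
      rw [PySem.List.pyGetD_of_nonneg _ _ le_rfl]; rfl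
    have g1 : PySem.List.pyGetD (a :: b :: t) (0 + 1) "" = b := by
      rw [PySem.List.pyGetD_of_nonneg _ _ (by omega)]; rfl
    have hfirst : pvBodyA (a :: b :: t) acc 0 = acc ++ [pvRec a b] := by
      unfold pvBodyA
      rw [hlen, g0, g1]
      rw [if_pos (by omega : (0:Int) + 1 < (t.length : Int) + 2), if_neg ha, if_neg hb]
    rw [hfirst]
    rw [show ((t.length : Int)) = PySem.List.len t from by simp [PySem.List.len]]
    rw [pvFold_pairs t (fun x hx => h x (by simp [hx])) (acc ++ [pvRec a b])]
    simp [pvPairs]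

theorem pvPairs_nil_iff (xs : List String) : pvPairs xs = [] ↔ xs = [] := by
  match xs with
  | [] => simp [pvPairs]
  | [a] => simp [pvPairs]
  | a :: b :: t => simp [pvPairs]

-- the state machine, run from any state, yields the paired records of the
-- stripped-and-filtered remainder appended to what the state already carries
theorem pvMach : ∀ (raws : List String) (recs : List (List (String × String)))
    (pend : Option String),
    pvFinish (raws.foldl pvStepB (recs, pend))
      = recs ++ pvPairs (pend.toList ++ ((raws.map PySem.Str.strip).filter (fun s => !(s == ""))))
  | [], recs, pend => by
    cases pend <;> simp [pvFinish, pvPairs]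
  | raw :: rest, recs, pend => by
    rw [List.foldl_cons]
    by_cases hs : PySem.Str.strip raw = ""
    · have hb : pvStepB (recs, pend) raw = (recs, pend) := by
        simp [pvStepB, hs]
      rw [hb, pvMach rest recs pend]
      simp [hs]
    · cases pend with
      | none =>
        have hb : pvStepB (recs, none) raw = (recs, some (PySem.Str.strip raw)) := by
          simp [pvStepB, hs]
        rw [hb, pvMach rest recs (some (PySem.Str.strip raw))]
        simp [hs]
      | some p =>
        have hb : pvStepB (recs, some p) raw = (recs ++ [pvRec p (PySem.Str.strip raw)], none) := by
          simp [pvStepB, hs]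
        rw [hb, pvMach rest (recs ++ [pvRec p (PySem.Str.strip raw)]) none]
        simp [hs, pvPairs]

-- ===== VERDICT (by name: the statement is the Claim_ definition above) =====
theorem records_from_text_spec : Claim_equal_records_from_text := by
  intro content _
  unfold Spec_records_from_text records_from_text records_from_text_alt
  simp only []
  set raws := (PySem.Str.split? content "\n\n").getD [] with hraws
  set sections := (raws.map PySem.Str.strip).filter (fun s => !(s == "")) with hsec
  have hne : ∀ x ∈ sections, x ≠ "" := by
    intro x hx
    have := List.of_mem_filter hx
    simpa using this
  rw [pvFold_pairs sections hne []]
  rw [pvMach raws [] none]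
  simp only [List.nil_append, Option.toList_none, ← hsec]
  by_cases hnil : sections = []
  · rw [hnil]
    by_cases hstr : PySem.Str.strip content = "" <;> simp [pvPairs, hstr]
  · have hp : ¬ pvPairs sections = [] := by simp [pvPairs_nil_iff, hnil]
    rw [if_neg (fun hc => hp hc.1), if_neg hp]
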